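-- pv_equiv track=rewrite | github.com/jorgelsc-dev/PortHound4 | app.py | infer_hops_from_observed_ttl
-- ===== SOURCE A (Python) =====
-- TTL_BASE_HINTS = (32, 60, 64, 128, 255)
--
-- def infer_hops_from_observed_ttl(observed_ttl):
--     try:
--         ttl_value = int(observed_ttl)
--     except Exception:
--         return None
--     if ttl_value < 1 or ttl_value > 255:
--         return None
--     guessed_base = 255
--     for base in TTL_BASE_HINTS:
--         if ttl_value <= base:
--             guessed_base = base
--             break
--     devices_in_path = max(int(guessed_base) - int(ttl_value), 0)
--     hops_to_target = int(devices_in_path) + 1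
--     return {
--         "observed_ttl": int(ttl_value),
--         "initial_ttl_guess": int(guessed_base),
--         "hops_to_target": int(hops_to_target),
--         "devices_in_path": int(devices_in_path),
--     }
-- ===== SOURCE B (Python) =====
-- TTL_BASE_HINTS = (32, 60, 64, 128, 255)
--
-- def infer_hops_from_observed_ttl(observed_ttl):
--     try:
--         ttl_value = int(observed_ttl)
--     except Exception:
--         return None
--     if ttl_value < 1 or ttl_value > 255:
--         return None
--     # binary search (hand-written bisect_left) for the first base >= ttl_value;
--     # the range guard guarantees lo lands on a valid index (255 at worst)
--     lo, hi = 0, len(TTL_BASE_HINTS)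
--     while lo < hi:
--         mid = (lo + hi) // 2
--         if TTL_BASE_HINTS[mid] < ttl_value:
--             lo = mid + 1
--         else:
--             hi = mid
--     guessed_base = TTL_BASE_HINTS[lo]
--     devices_in_path = guessed_base - ttl_value  # always >= 0 here, no max needed
--     return {
--         "observed_ttl": ttl_value,
--         "initial_ttl_guess": guessed_base,
--         "hops_to_target": devices_in_path + 1,
--         "devices_in_path": devices_in_path,
--     }
-- ===== Notes on version B (the rewrite author's own statement) =====
-- stated objective: alternative
-- what changed: Replaces the linear first-match scan over TTL_BASE_HINTS (with a max() clamp) by a hand-written bisect_left binary search for the first base >= ttl, dropping the then-unneeded max.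
import Mathlib
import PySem

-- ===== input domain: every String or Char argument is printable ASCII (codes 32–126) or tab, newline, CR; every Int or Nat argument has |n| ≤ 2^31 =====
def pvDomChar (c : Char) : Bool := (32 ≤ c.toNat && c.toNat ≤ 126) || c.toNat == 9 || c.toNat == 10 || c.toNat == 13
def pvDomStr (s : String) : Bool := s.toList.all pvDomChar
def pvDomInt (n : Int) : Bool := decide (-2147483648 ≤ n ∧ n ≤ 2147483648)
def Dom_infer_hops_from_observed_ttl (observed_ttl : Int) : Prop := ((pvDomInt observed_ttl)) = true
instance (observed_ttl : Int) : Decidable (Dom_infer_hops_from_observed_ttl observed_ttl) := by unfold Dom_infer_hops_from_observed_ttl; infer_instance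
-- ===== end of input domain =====

-- ===== PORT A =====
def aLoop (ttl : Int) : List Int → Int
  | [] => 255            -- guessed_base's initial value survives if no break fires
  | b :: rest => if ttl ≤ b then b else aLoop ttl rest

def infer_hops_from_observed_ttl (observed_ttl : Int) : Option (List (String × Int)) :=
  let ttl_value := observed_ttl          -- int(observed_ttl) is the identity on an int and cannot raise
  if ttl_value < 1 ∨ ttl_value > 255 then none
  else
    let guessed_base := aLoop ttl_value [32, 60, 64, 128, 255]
    let devices_in_path := max (guessed_base - ttl_value) 0
    let hops_to_target := devices_in_path + 1
    some [("observed_ttl", ttl_value), ("initial_ttl_guess", guessed_base),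
          ("hops_to_target", hops_to_target), ("devices_in_path", devices_in_path)]

-- ===== PORT B =====
-- the while-loop of Source B's bisect_left; indices are always in range so getD's default is never used
def bLoop (hints : List Int) (ttl : Int) (lo hi : Nat) : Nat :=
  if lo < hi then
    let mid := (lo + hi) / 2
    if hints.getD mid 0 < ttl then bLoop hints ttl (mid + 1) hi
    else bLoop hints ttl lo mid
  else lo
termination_by hi - lo
decreasing_by all_goals omega

def infer_hops_from_observed_ttl_alt (observed_ttl : Int) : Option (List (String × Int)) :=
  let ttl_value := observed_ttl          -- int(observed_ttl) is the identity on an int and cannot raise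
  if ttl_value < 1 ∨ ttl_value > 255 then none
  else
    let hints : List Int := [32, 60, 64, 128, 255]
    let lo := bLoop hints ttl_value 0 hints.length
    let guessed_base := hints.getD lo 0
    let devices_in_path := guessed_base - ttl_value
    some [("observed_ttl", ttl_value), ("initial_ttl_guess", guessed_base),
          ("hops_to_target", devices_in_path + 1), ("devices_in_path", devices_in_path)]

-- ===== PRECONDITION & SPEC =====
def Spec_infer_hops_from_observed_ttl (observed_ttl : Int) (out : Option (List (String × Int))) : Prop := out = infer_hops_from_observed_ttl_alt observed_ttl
instance (observed_ttl : Int) (out : Option (List (String × Int))) : Decidable (Spec_infer_hops_from_observed_ttl observed_ttl out) := by unfold Spec_infer_hops_from_observed_ttl; infer_instance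

-- ===== CLAIM (what is proved, stated in full; the proofs are below) =====
def Claim_equal_infer_hops_from_observed_ttl : Prop := ∀ (observed_ttl : Int), Dom_infer_hops_from_observed_ttl observed_ttl → Spec_infer_hops_from_observed_ttl observed_ttl (infer_hops_from_observed_ttl observed_ttl)

-- ===== LEMMAS AND PROOFS =====

-- ===== VERDICT (by name: the statement is the Claim_ definition above) =====
theorem bases_agree (t : Int) (h1 : 1 ≤ t) (h2 : t ≤ 255) :
    aLoop t [32, 60, 64, 128, 255] = List.getD [32, 60, 64, 128, 255] (bLoop [32, 60, 64, 128, 255] t 0 5) 0 := by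
  rw [bLoop]; norm_num
  by_cases c64 : (64 : Int) < t
  · rw [if_pos c64, bLoop]; norm_num
    rw [if_neg (show ¬ (255 : Int) < t by omega), bLoop]; norm_num
    by_cases c128 : (128 : Int) < t
    · rw [if_pos c128, bLoop]
      simp [aLoop, show ¬ t ≤ 32 by omega, show ¬ t ≤ 60 by omega,
            show ¬ t ≤ 64 by omega, show ¬ t ≤ 128 by omega]
    · rw [if_neg c128, bLoop]
      simp [aLoop, show ¬ t ≤ 32 by omega, show ¬ t ≤ 60 by omega,
            show ¬ t ≤ 64 by omega, show t ≤ 128 by omega]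
  · rw [if_neg c64, bLoop]; norm_num
    by_cases c60 : (60 : Int) < t
    · rw [if_pos c60, bLoop]
      simp [aLoop, show ¬ t ≤ 32 by omega, show ¬ t ≤ 60 by omega, show t ≤ 64 by omega]
    · rw [if_neg c60, bLoop]; norm_num
      by_cases c32 : (32 : Int) < t
      · rw [if_pos c32, bLoop]
        simp [aLoop, show ¬ t ≤ 32 by omega, show t ≤ 60 by omega]
      · rw [if_neg c32, bLoop]
        simp [aLoop, show t ≤ 32 by omega]

theorem base_ge (t : Int) (h1 : 1 ≤ t) (h2 : t ≤ 255) : t ≤ aLoop t [32, 60, 64, 128, 255] := by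
  by_cases c32 : t ≤ 32 <;> by_cases c60 : t ≤ 60 <;> by_cases c64 : t ≤ 64 <;> by_cases c128 : t ≤ 128 <;>
    simp [aLoop, c32, c60, c64, c128] <;> omega

theorem infer_hops_from_observed_ttl_spec : Claim_equal_infer_hops_from_observed_ttl := by
  intro t _
  unfold Spec_infer_hops_from_observed_ttl infer_hops_from_observed_ttl infer_hops_from_observed_ttl_alt
  by_cases hg : t < 1 ∨ t > 255
  · simp [hg]
  · have h1 : 1 ≤ t := by omega
    have h2 : t ≤ 255 := by omega
    have hb := bases_agree t h1 h2
    have hge := base_ge t h1 h2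
    simp only [hg, if_false, List.length]
    rw [← hb]
    have : max (aLoop t [32, 60, 64, 128, 255] - t) 0 = aLoop t [32, 60, 64, 128, 255] - t := by omega
    rw [this]
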